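-- pv_equiv track=rewrite | github.com/cliffpham/algos_dataStructures | algos/magic_square.py | place_num
-- ===== SOURCE A (Python) =====
-- def place_num(nb, spot):
--     x = spot[0]
--     y = spot[1]
--
--     if check_row(nb, x, y, nb[x][y]) or check_col(nb, x, y, nb[x][y]):
--         return True
--
--     options = [1,2,3,4,5,6,7,8,9]
--
--     for option in options:
--         if check_row(nb, x, y, option) or check_col(nb,x, y, option):
--             nb[x][y] = option
--             return True
--
--     return False
--
-- def check_row(nb, x, y, option):
--     temp = nb[x][y]
--     val = 0
--     nb[x][y] = option
--
--     for i in range(len(nb)):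
--         val = val + nb[x][i]
--
--     if val == 15:
--         nb[x][y] = temp
--         return True
--
--     nb[x][y] = temp
--     return False
--
-- def check_col(nb, x, y, option):
--     temp = nb[x][y]
--     val = 0
--     nb[x][y] = option
--
--     for i in range(len(nb)):
--         val = val + nb[i][y]
--
--     if val == 15:
--         nb[x][y] = temp
--         return True
--
--     nb[x][y] = temp
--     return False
-- ===== SOURCE B (Python) =====
-- def place_num(nb, spot):
--     x, y = spot
--     cur = nb[x][y]
--     row_p = sum(nb[x]) - cur
--     col_p = sum(nb[i][y] for i in range(len(nb))) - cur
--     if row_p + cur == 15 or col_p + cur == 15: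
--         return True
--     for option in range(1, 10):
--         if row_p + option == 15 or col_p + option == 15:
--             nb[x][y] = option
--             return True
--     return False
-- ===== Notes on version B (the rewrite author's own statement) =====
-- stated objective: simpler
-- what changed: B computes the row and column partial sums once and tests each candidate with two additions, instead of A's per-option full row/column re-summation through mutate-and-restore helper scans.
-- outside the precondition, e.g. on place_num([[8, 2]], (0, 1)): A returns False, B returns True
import Mathlib
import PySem

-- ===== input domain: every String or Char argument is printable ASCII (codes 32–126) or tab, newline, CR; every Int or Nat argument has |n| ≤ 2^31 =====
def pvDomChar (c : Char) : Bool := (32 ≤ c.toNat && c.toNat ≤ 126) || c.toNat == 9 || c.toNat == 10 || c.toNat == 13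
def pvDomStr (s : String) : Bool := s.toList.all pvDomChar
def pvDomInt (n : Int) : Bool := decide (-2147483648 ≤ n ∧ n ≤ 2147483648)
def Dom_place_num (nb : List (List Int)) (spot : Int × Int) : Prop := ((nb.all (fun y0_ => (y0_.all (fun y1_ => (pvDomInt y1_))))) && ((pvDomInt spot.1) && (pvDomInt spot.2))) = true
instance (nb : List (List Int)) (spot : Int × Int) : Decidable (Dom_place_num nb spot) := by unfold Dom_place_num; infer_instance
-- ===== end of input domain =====

-- B replaces A's per-option full row/column re-summation (with temporary in-place mutation)
-- by two partial sums computed once, then a flat arithmetic test per option (objective: simpler).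
-- Both Pythons mutate nb[x][y] identically on the placing path; the equivalence proved here is
-- about the RETURN value.

-- ===== PORT A =====
-- check_row: temp/restore of nb[x][y] is modelled purely: the sum is taken over the grid with
-- the cell set to `option`; the restore is a no-op for the returned Bool.
def check_row (nb : List (List Int)) (x y option : Int) : Bool :=
  let row' := PySem.List.pySetD (PySem.List.pyGetD nb x []) y option
  let nb' := PySem.List.pySetD nb x row'
  let val := (PySem.List.pyRange 0 nb'.length 1).foldl
      (fun acc i => acc + PySem.List.pyGetD (PySem.List.pyGetD nb' x []) i 0) 0
  val == 15

def check_col (nb : List (List Int)) (x y option : Int) : Bool :=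
  let row' := PySem.List.pySetD (PySem.List.pyGetD nb x []) y option
  let nb' := PySem.List.pySetD nb x row'
  let val := (PySem.List.pyRange 0 nb'.length 1).foldl
      (fun acc i => acc + PySem.List.pyGetD (PySem.List.pyGetD nb' i []) y 0) 0
  val == 15

def place_num (nb : List (List Int)) (spot : Int × Int) : Bool :=
  let x := spot.1
  let y := spot.2
  let cur := PySem.List.pyGetD (PySem.List.pyGetD nb x []) y 0
  if check_row nb x y cur || check_col nb x y cur then true
  else
    -- for option in options: if …: nb[x][y] = option; return True / return False
    ([1,2,3,4,5,6,7,8,9] : List Int).any (fun option => check_row nb x y option || check_col nb x y option)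

-- ===== PORT B =====
def place_num_alt (nb : List (List Int)) (spot : Int × Int) : Bool :=
  let x := spot.1
  let y := spot.2
  let cur := PySem.List.pyGetD (PySem.List.pyGetD nb x []) y 0
  let row_p := (PySem.List.pyGetD nb x []).sum - cur
  let col_p := ((PySem.List.pyRange 0 nb.length 1).map
      (fun i => PySem.List.pyGetD (PySem.List.pyGetD nb i []) y 0)).sum - cur
  if row_p + cur == 15 || col_p + cur == 15 then true
  else (PySem.List.pyRange 1 10 1).any (fun option => row_p + option == 15 || col_p + option == 15)

-- ===== PRECONDITION & SPEC =====
-- Pre_ is the function's natural magic-square domain: a nonempty SQUARE grid with both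
-- coordinates valid Python indices (negative wraparound allowed). It excludes ragged /
-- non-square grids on which A still happens to return because every row and column it scans
-- is long enough — there A sums a row prefix that may miss the addressed cell (see cites).
def Pre_place_num (nb : List (List Int)) (spot : Int × Int) : Prop :=
  (∀ r ∈ nb, r.length = nb.length) ∧
  -(nb.length : Int) ≤ spot.1 ∧ spot.1 < nb.length ∧
  -(nb.length : Int) ≤ spot.2 ∧ spot.2 < nb.length

instance (nb : List (List Int)) (spot : Int × Int) : Decidable (Pre_place_num nb spot) := by
  unfold Pre_place_num; infer_instance

def pvWitness_place_num : List (List Int) × (Int × Int) := ([[2, 7, 6], [9, 0, 1], [4, 3, 8]], (1, 1))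

def Spec_place_num (nb : List (List Int)) (spot : Int × Int) (out : Bool) : Prop := out = place_num_alt nb spot
instance (nb : List (List Int)) (spot : Int × Int) (out : Bool) : Decidable (Spec_place_num nb spot out) := by unfold Spec_place_num; infer_instance

-- ===== CLAIM (what is proved, stated in full; the proofs are below) =====
def Claim_equal_place_num : Prop := ∀ (nb : List (List Int)) (spot : Int × Int), Dom_place_num nb spot → Pre_place_num nb spot → Spec_place_num nb spot (place_num nb spot)

-- ===== LEMMAS AND PROOFS =====

-- normalised Python index (the k with xs[i] = xs[k], for i in range)
def pvNorm (n : Nat) (i : Int) : Nat := if 0 ≤ i then i.toNat else n - (-i).toNat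

theorem pvNorm_lt {n : Nat} {i : Int} (h1 : -(n : Int) ≤ i) (h2 : i < n) : pvNorm n i < n := by
  unfold pvNorm; split_ifs <;> omega

theorem pyIdx?_norm {n : Nat} {i : Int} (h1 : -(n : Int) ≤ i) (h2 : i < n) :
    PySem.List.pyIdx? n i = some (pvNorm n i) := by
  simp only [PySem.List.pyIdx?, pvNorm]
  split_ifs with g1
  · rfl
  · rfl

theorem pyGetD_norm {α : Type} (xs : List α) {i : Int} (d : α)
    (h1 : -(xs.length : Int) ≤ i) (h2 : i < xs.length) :
    PySem.List.pyGetD xs i d = xs.getD (pvNorm xs.length i) d := by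
  simp [PySem.List.pyGetD, PySem.List.pyGet?, pyIdx?_norm h1 h2, List.getD]

theorem pySetD_norm {α : Type} (xs : List α) {i : Int} (v : α)
    (h1 : -(xs.length : Int) ≤ i) (h2 : i < xs.length) :
    PySem.List.pySetD xs i v = xs.set (pvNorm xs.length i) v := by
  simp [PySem.List.pySetD, PySem.List.pySet?, pyIdx?_norm h1 h2]

theorem sum_eq_sum_getD (xs : List Int) :
    xs.sum = ∑ k ∈ Finset.range xs.length, xs.getD k 0 := by
  induction xs with
  | nil => simp
  | cons a t ih =>
      rw [List.length_cons, Finset.sum_range_succ']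
      simp [ih]
      omega

theorem sum_map_pyRange (g : Int → Int) (n : Nat) :
    ((PySem.List.pyRange 0 (n : Int) 1).map g).sum = ∑ k ∈ Finset.range n, g (k : Int) := by
  induction n with
  | zero => simp
  | succ m ih =>
      rw [show ((m + 1 : Nat) : Int) = (m : Int) + 1 by push_cast; ring]
      rw [PySem.List.pyRange_one_succ_right (by positivity : (0:Int) ≤ (m:Int))]
      simp [ih, Finset.sum_range_succ]

theorem foldl_pyRange_sum (g : Int → Int) (n : Nat) :
    (PySem.List.pyRange 0 (n : Int) 1).foldl (fun acc i => acc + g i) 0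
      = ∑ k ∈ Finset.range n, g (k : Int) := by
  simp [PySem.List.foldl_add, sum_map_pyRange]

theorem sum_update (n Y : Nat) (hY : Y < n) (f : Nat → Int) (v : Int) :
    (∑ k ∈ Finset.range n, (if k = Y then v else f k))
      = (∑ k ∈ Finset.range n, f k) + v - f Y := by
  have h : ∀ k, (if k = Y then v else f k) = f k + (if k = Y then v - f Y else 0) := by
    intro k; split_ifs with h <;> simp [h]
  simp only [h, Finset.sum_add_distrib, Finset.sum_ite_eq' (Finset.range n) Y,
    Finset.mem_range.mpr hY, if_pos]
  ring

theorem getD_set_int (xs : List Int) (i k : Nat) (v : Int) (hi : i < xs.length) :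
    (xs.set i v).getD k 0 = if k = i then v else xs.getD k 0 := by
  rw [List.getD_eq_getElem?_getD, List.getD_eq_getElem?_getD, List.getElem?_set]
  by_cases h1 : i = k
  · subst h1; simp [hi]
  · have h2 : ¬ k = i := fun h => h1 h.symm
    simp [h1, h2]

-- the canonical values both programs' tests reduce to
theorem check_row_eq (nb : List (List Int)) (x y : Int)
    (hsq : ∀ r ∈ nb, r.length = nb.length)
    (hx1 : -(nb.length : Int) ≤ x) (hx2 : x < nb.length)
    (hy1 : -(nb.length : Int) ≤ y) (hy2 : y < nb.length) (v : Int) :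
    check_row nb x y v
      = ((nb.getD (pvNorm nb.length x) []).sum
          - (nb.getD (pvNorm nb.length x) []).getD (pvNorm nb.length y) 0 + v == 15) := by
  set n := nb.length with hn
  set X := pvNorm n x with hX
  set Y := pvNorm n y with hY
  have hXn : X < n := pvNorm_lt hx1 hx2
  have hYn : Y < n := pvNorm_lt hy1 hy2
  have hrow_mem : nb.getD X [] ∈ nb := by
    rw [List.getD_eq_getElem?_getD, List.getElem?_eq_getElem hXn]
    exact List.getElem_mem _
  set row := nb.getD X [] with hrow
  have hrlen : row.length = n := hsq _ hrow_mem
  simp only [check_row]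
  rw [pyGetD_norm nb [] hx1 hx2, ← hrow,
    pySetD_norm row v (by rw [hrlen]; exact hy1) (by rw [hrlen]; exact hy2), hrlen, ← hY,
    pySetD_norm nb ((row.set Y v)) hx1 hx2, ← hX]
  have hlen' : (nb.set X (row.set Y v)).length = n := by simp [hn]
  rw [hlen',
    pyGetD_norm (nb.set X (row.set Y v)) [] (by rw [hlen']; exact hx1) (by rw [hlen']; exact hx2),
    hlen', ← hX]
  have hget' : (nb.set X (row.set Y v)).getD X [] = row.set Y v := by
    rw [List.getD_eq_getElem?_getD, List.getElem?_set_self (by omega)]; rfl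
  rw [hget', foldl_pyRange_sum (fun i => PySem.List.pyGetD (row.set Y v) i 0) n]
  have hterm : ∀ k ∈ Finset.range n, PySem.List.pyGetD (row.set Y v) (k : Int) 0
      = (if k = Y then v else row.getD k 0) := by
    intro k hk
    rw [PySem.List.pyGetD_natCast, getD_set_int row Y k v (by omega)]
  rw [Finset.sum_congr rfl hterm, sum_update n Y hYn (fun k => row.getD k 0) v,
    sum_eq_sum_getD row, hrlen]
  have e : (∑ k ∈ Finset.range n, row.getD k 0) + v - row.getD Y 0
      = (∑ k ∈ Finset.range n, row.getD k 0) - row.getD Y 0 + v := by ring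
  rw [e]

theorem check_col_eq (nb : List (List Int)) (x y : Int)
    (hsq : ∀ r ∈ nb, r.length = nb.length)
    (hx1 : -(nb.length : Int) ≤ x) (hx2 : x < nb.length)
    (hy1 : -(nb.length : Int) ≤ y) (hy2 : y < nb.length) (v : Int) :
    check_col nb x y v
      = ((∑ k ∈ Finset.range nb.length, (nb.getD k []).getD (pvNorm nb.length y) 0)
          - (nb.getD (pvNorm nb.length x) []).getD (pvNorm nb.length y) 0 + v == 15) := by
  set n := nb.length with hn
  set X := pvNorm n x with hX
  set Y := pvNorm n y with hY
  have hXn : X < n := pvNorm_lt hx1 hx2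
  have hYn : Y < n := pvNorm_lt hy1 hy2
  have hrow_mem : nb.getD X [] ∈ nb := by
    rw [List.getD_eq_getElem?_getD, List.getElem?_eq_getElem hXn]
    exact List.getElem_mem _
  set row := nb.getD X [] with hrow
  have hrlen : row.length = n := hsq _ hrow_mem
  simp only [check_col]
  rw [pyGetD_norm nb [] hx1 hx2, ← hrow,
    pySetD_norm row v (by rw [hrlen]; exact hy1) (by rw [hrlen]; exact hy2), hrlen, ← hY,
    pySetD_norm nb ((row.set Y v)) hx1 hx2, ← hX]
  have hlen' : (nb.set X (row.set Y v)).length = n := by simp [hn]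
  rw [hlen', foldl_pyRange_sum
    (fun i => PySem.List.pyGetD (PySem.List.pyGetD (nb.set X (row.set Y v)) i []) y 0) n]
  have hterm : ∀ k ∈ Finset.range n,
      PySem.List.pyGetD (PySem.List.pyGetD (nb.set X (row.set Y v)) (k : Int) []) y 0
      = (if k = X then v else (nb.getD k []).getD Y 0) := by
    intro k hk
    have hkn : k < n := Finset.mem_range.mp hk
    rw [PySem.List.pyGetD_natCast]
    have hgd : (nb.set X (row.set Y v)).getD k [] = if k = X then row.set Y v else nb.getD k [] := by
      by_cases hkX : k = X
      · subst hkX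
        rw [List.getD_eq_getElem?_getD, List.getElem?_set_self (by omega), if_pos rfl]; rfl
      · rw [List.getD_eq_getElem?_getD, List.getElem?_set_ne (by omega), if_neg hkX,
          List.getD_eq_getElem?_getD]
    rw [hgd]
    by_cases hkX : k = X
    · rw [if_pos hkX, if_pos hkX]
      have hl : (row.set Y v).length = n := by simp [hrlen]
      rw [pyGetD_norm (row.set Y v) 0 (by rw [hl]; exact hy1) (by rw [hl]; exact hy2), hl, ← hY,
        getD_set_int row Y Y v (by omega), if_pos rfl]
    · rw [if_neg hkX, if_neg hkX]
      have hmem : nb.getD k [] ∈ nb := by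
        rw [List.getD_eq_getElem?_getD, List.getElem?_eq_getElem hkn]
        exact List.getElem_mem _
      have hl : (nb.getD k []).length = n := hsq _ hmem
      rw [pyGetD_norm (nb.getD k []) 0 (by rw [hl]; exact hy1) (by rw [hl]; exact hy2), hl, ← hY]
  rw [Finset.sum_congr rfl hterm,
    sum_update n X hXn (fun k => (nb.getD k []).getD Y 0) v, ← hrow]
  have e : (∑ k ∈ Finset.range n, (nb.getD k []).getD Y 0) + v - row.getD Y 0
      = (∑ k ∈ Finset.range n, (nb.getD k []).getD Y 0) - row.getD Y 0 + v := by ring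
  rw [e]

-- ===== VERDICT (by name: the statement is the Claim_ definition above) =====
theorem place_num_spec : Claim_equal_place_num := by
  intro nb spot _hdom hpre
  obtain ⟨hsq, hx1, hx2, hy1, hy2⟩ := hpre
  unfold Spec_place_num
  simp only [place_num, place_num_alt]
  set n := nb.length with hn
  set X := pvNorm n spot.1 with hX
  set Y := pvNorm n spot.2 with hY
  have hXn : X < n := pvNorm_lt hx1 hx2
  have hYn : Y < n := pvNorm_lt hy1 hy2
  have hrow_mem : nb.getD X [] ∈ nb := by
    rw [List.getD_eq_getElem?_getD, List.getElem?_eq_getElem hXn]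
    exact List.getElem_mem _
  have hrlen : (nb.getD X []).length = n := hsq _ hrow_mem
  -- cur on both sides is the canonical cell value
  have hcur : PySem.List.pyGetD (nb.getD X []) spot.2 0 = (nb.getD X []).getD Y 0 := by
    rw [pyGetD_norm (nb.getD X []) 0 (by rw [hrlen]; exact hy1) (by rw [hrlen]; exact hy2),
      hrlen, ← hY]
  -- B's column partial sum is the canonical column sum
  have hcol : ((PySem.List.pyRange 0 (n : Int) 1).map
      (fun i => PySem.List.pyGetD (PySem.List.pyGetD nb i []) spot.2 0)).sum
      = ∑ k ∈ Finset.range n, (nb.getD k []).getD Y 0 := by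
    rw [sum_map_pyRange]
    refine Finset.sum_congr rfl fun k hk => ?_
    have hkn : k < n := Finset.mem_range.mp hk
    have hmem : nb.getD k [] ∈ nb := by
      rw [List.getD_eq_getElem?_getD, List.getElem?_eq_getElem hkn]
      exact List.getElem_mem _
    have hl : (nb.getD k []).length = n := hsq _ hmem
    rw [PySem.List.pyGetD_natCast,
      pyGetD_norm (nb.getD k []) 0 (by rw [hl]; exact hy1) (by rw [hl]; exact hy2), hl, ← hY]
  have hrowsum : PySem.List.pyGetD nb spot.1 [] = nb.getD X [] := by
    rw [pyGetD_norm nb [] hx1 hx2, ← hX]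
  have hRange : PySem.List.pyRange 1 10 1 = ([1,2,3,4,5,6,7,8,9] : List Int) := by decide
  simp only [check_row_eq nb spot.1 spot.2 hsq hx1 hx2 hy1 hy2,
    check_col_eq nb spot.1 spot.2 hsq hx1 hx2 hy1 hy2,
    hrowsum, hcur, hcol, hRange, ← hn, ← hX, ← hY]
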